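-- pv_equiv track=rewrite | github.com/tringv8/miniclaw | web/backend/backend/middleware/launcher_dashboard_auth.py | canonical_path
-- ===== SOURCE A (Python) =====
-- def canonical_path(path: str) -> str:
--     if not path:
--         return "/"
--     parts = [part for part in path.split("/") if part not in {"", "."}]
--     cleaned = []
--     for part in parts:
--         if part == "..":
--             if cleaned:
--                 cleaned.pop()
--             continue
--         cleaned.append(part)
--     return "/" + "/".join(cleaned)
-- ===== SOURCE B (Python) =====
-- def canonical_path(path: str) -> str:
--     if not path:
--         return "/"
--     parts = [p for p in path.split("/") if p not in ("", ".")]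
--     while ".." in parts:
--         i = parts.index("..")
--         parts = parts[:max(i - 1, 0)] + parts[i + 1:]
--     return "/" + "/".join(parts)
-- ===== Notes on version B (the rewrite author's own statement) =====
-- stated objective: alternative
-- what changed: Replaces A's single forward pass with a mutable stack (push names, pop on a dot-dot segment) by a fixpoint rewriting loop: while any dot-dot segment remains in the list, find the first one with list.index and splice it out together with the name just before it (or alone if it is first).
import Mathlib
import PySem

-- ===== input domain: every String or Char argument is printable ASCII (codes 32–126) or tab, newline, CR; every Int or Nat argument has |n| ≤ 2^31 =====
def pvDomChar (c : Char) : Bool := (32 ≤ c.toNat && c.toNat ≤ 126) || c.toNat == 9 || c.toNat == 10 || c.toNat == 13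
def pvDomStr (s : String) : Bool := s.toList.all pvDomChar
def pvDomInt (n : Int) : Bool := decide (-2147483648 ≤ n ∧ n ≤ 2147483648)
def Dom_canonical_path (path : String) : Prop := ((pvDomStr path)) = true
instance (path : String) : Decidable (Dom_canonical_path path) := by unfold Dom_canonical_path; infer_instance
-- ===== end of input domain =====

-- B replaces A's single-pass mutable stack by repeated cancellation: while some '..' remains,
-- the first '..' is deleted together with the name just before it (objective: alternative).

-- ===== PORT A =====
-- forward pass: a stack 'cleaned', '..' pops (if nonempty), a name is pushed.
-- split? never returns none here since the separator "/" is nonempty, so .getD [] is exact.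
def canonical_path (path : String) : String :=
  if path = "" then "/"
  else
    let parts := ((PySem.Str.split? path "/").getD []).filter
      (fun part => !(part == "" || part == "."))
    let cleaned := parts.foldl
      (fun cleaned part =>
        if part = ".." then (if cleaned ≠ [] then cleaned.dropLast else cleaned)
        else cleaned ++ [part]) ([] : List String)
    "/" ++ PySem.Str.join "/" cleaned

-- ===== PORT B =====
-- B's while-loop: find the first '..' (parts.index), splice it out together with the
-- preceding element; parts[:max(i-1,0)] is List.take (i-1) since Nat subtraction truncates at 0.
def pvCancel (parts : List String) : List String :=
  match h : parts.idxOf? ".." with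
  | none => parts
  | some i => pvCancel (parts.take (i - 1) ++ parts.drop (i + 1))
termination_by parts.length
decreasing_by
  have hi : i < parts.length := (List.idxOf?_eq_some_iff.mp h).1
  simp [List.length_take, List.length_drop]
  omega

def canonical_path_alt (path : String) : String :=
  if path = "" then "/"
  else
    let parts := ((PySem.Str.split? path "/").getD []).filter
      (fun p => !(p == "" || p == "."))
    "/" ++ PySem.Str.join "/" (pvCancel parts)

-- ===== PRECONDITION & SPEC =====
def Spec_canonical_path (path : String) (out : String) : Prop := out = canonical_path_alt path
instance (path : String) (out : String) : Decidable (Spec_canonical_path path out) := by unfold Spec_canonical_path; infer_instance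

-- ===== CLAIM (what is proved, stated in full; the proofs are below) =====
def Claim_equal_canonical_path : Prop := ∀ (path : String), Dom_canonical_path path → Spec_canonical_path path (canonical_path path)

-- ===== LEMMAS AND PROOFS =====

-- A's forward step, named for the proofs
def pvStepA (cleaned : List String) (part : String) : List String :=
  if part = ".." then (if cleaned ≠ [] then cleaned.dropLast else cleaned)
  else cleaned ++ [part]

-- a '..'-free block of names just appends to the stack
lemma pv_fold_no_dots (l : List String) (c : List String) (h : ".." ∉ l) :
    l.foldl pvStepA c = c ++ l := by
  induction l generalizing c with
  | nil => simp
  | cons p t ih =>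
    have hp : p ≠ ".." := fun hp => h (hp ▸ List.mem_cons_self)
    have hA : pvStepA c p = c ++ [p] := by simp [pvStepA, hp]
    simp only [List.foldl_cons, hA, ih _ (fun hm => h (List.mem_cons_of_mem _ hm))]
    simp

-- cancelling the first '..' with its predecessor does not change A's stack result
lemma pv_fold_cancel (parts : List String) (i : Nat)
    (h : parts.idxOf? ".." = some i) :
    (parts.take (i - 1) ++ parts.drop (i + 1)).foldl pvStepA [] =
      parts.foldl pvStepA [] := by
  obtain ⟨hi, hget, hbefore⟩ := List.idxOf?_eq_some_iff.mp h
  have hnodot : ".." ∉ parts.take i := by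
    intro hm
    obtain ⟨j, hj, hjv⟩ := List.mem_iff_getElem.mp hm
    have hlt : j < i := by simp [List.length_take] at hj; omega
    exact hbefore j hlt (by simpa [List.getElem_take] using hjv)
  have hdecomp : parts = parts.take i ++ ".." :: parts.drop (i + 1) := by
    conv_lhs => rw [← List.take_append_drop i parts]
    congr 1
    rw [List.drop_eq_getElem_cons hi, hget]
  have hfold_take : (parts.take i).foldl pvStepA ([] : List String) = parts.take i :=
    (pv_fold_no_dots _ _ hnodot).trans (by simp)
  have hdot : pvStepA (parts.take i) ".." = parts.take (i - 1) := by
    by_cases hi0 : i = 0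
    · subst hi0; simp [pvStepA]
    · have hne : parts.take i ≠ [] := by
        have hl : (parts.take i).length = min i parts.length := List.length_take
        intro hnil
        rw [hnil] at hl
        simp at hl
        omega
      simp [pvStepA, hne, List.dropLast_eq_take, List.take_take]
      omega
  have hnodot' : ".." ∉ parts.take (i - 1) := by
    intro hm
    rw [show parts.take (i - 1) = (parts.take i).take (i - 1) by
      rw [List.take_take]; congr 1; omega] at hm
    exact hnodot (List.take_subset _ _ hm)
  calc (parts.take (i - 1) ++ parts.drop (i + 1)).foldl pvStepA []
      = (parts.drop (i + 1)).foldl pvStepA (parts.take (i - 1)) := by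
        rw [List.foldl_append, pv_fold_no_dots _ _ hnodot']
        simp
    _ = parts.foldl pvStepA [] := by
        conv_rhs => rw [hdecomp]
        rw [List.foldl_append, hfold_take]
        simp only [List.foldl_cons, hdot]

-- B's cancellation loop computes exactly A's stack fold
lemma pv_cancel_eq_fold (parts : List String) :
    pvCancel parts = parts.foldl pvStepA [] := by
  induction parts using pvCancel.induct with
  | case1 parts h =>
    rw [pvCancel.eq_def, h]
    dsimp only
    have hnd : ".." ∉ parts := List.idxOf?_eq_none_iff.mp h
    exact ((pv_fold_no_dots _ _ hnd).trans (by simp)).symm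
  | case2 parts i h ih =>
    rw [pvCancel.eq_def, h]
    dsimp only
    rw [ih]
    exact pv_fold_cancel parts i h

-- ===== VERDICT (by name: the statement is the Claim_ definition above) =====
theorem canonical_path_spec : Claim_equal_canonical_path := by
  intro path _
  unfold Spec_canonical_path canonical_path canonical_path_alt
  by_cases h : path = ""
  · simp [h]
  · simp only [if_neg h]
    rw [pv_cancel_eq_fold]
    rfl
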